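-- pv_equiv track=rewrite | github.com/ElToroDM/exerionbit-esp32c3-bootloader | scripts/validate_bootlog.py | check_crc_fail_safety
-- ===== SOURCE A (Python) =====
-- def check_crc_fail_safety(lines: list[str]) -> tuple[bool, str]:
--     crc_fail_idx = next((i for i, line in enumerate(lines) if "BL_EVT:APP_CRC_FAIL" in line), -1)
--     if crc_fail_idx == -1:
--         return True, "CRC fail path not observed in this log (non-blocking)."
--
--     handoff_after_crc_fail = any("BL_EVT:HANDOFF_APP" in line for line in lines[crc_fail_idx + 1 :])
--     if handoff_after_crc_fail:
--         return False, "CRC fail observed but app handoff occurred afterward in same trace."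
--
--     return True, "CRC fail path observed without app handoff."
-- ===== SOURCE B (Python) =====
-- def check_crc_fail_safety(lines: list[str]) -> tuple[bool, str]:
--     crc_seen = False
--     for line in lines:
--         if crc_seen and "BL_EVT:HANDOFF_APP" in line:
--             return False, "CRC fail observed but app handoff occurred afterward in same trace."
--         if "BL_EVT:APP_CRC_FAIL" in line:
--             crc_seen = True
--     if crc_seen:
--         return True, "CRC fail path observed without app handoff."
--     return True, "CRC fail path not observed in this log (non-blocking)."
-- ===== Notes on version B (the rewrite author's own statement) =====
-- stated objective: simpler
-- what changed: Replaced the enumerate/next index search plus a second scan over a slice with a single pass that threads a crc_seen boolean and returns early on a handoff after a CRC fail.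
import Mathlib
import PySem

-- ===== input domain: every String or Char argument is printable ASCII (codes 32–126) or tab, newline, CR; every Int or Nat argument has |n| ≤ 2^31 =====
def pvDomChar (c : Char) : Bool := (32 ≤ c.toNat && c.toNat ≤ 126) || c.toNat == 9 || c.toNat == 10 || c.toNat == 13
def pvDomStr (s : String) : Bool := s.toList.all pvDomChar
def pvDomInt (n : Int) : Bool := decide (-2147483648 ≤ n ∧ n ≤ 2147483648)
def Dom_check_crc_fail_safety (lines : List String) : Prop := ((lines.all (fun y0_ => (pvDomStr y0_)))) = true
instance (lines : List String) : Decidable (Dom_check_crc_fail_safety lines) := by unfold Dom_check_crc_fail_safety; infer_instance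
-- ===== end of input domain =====

-- B replaces A's index search + slice scan by one pass threading a crc_seen boolean (simpler decomposition, same cost).

-- ===== PORT A =====
-- next((i for i, line in enumerate(lines) if "BL_EVT:APP_CRC_FAIL" in line), -1)
def pvNextCrcIdx : List String → Int → Int
  | [], _ => -1
  | l :: rest, i =>
    if PySem.Str.isIn "BL_EVT:APP_CRC_FAIL" l then i else pvNextCrcIdx rest (i + 1)

def check_crc_fail_safety (lines : List String) : Bool × String :=
  let crc_fail_idx := pvNextCrcIdx lines 0
  if crc_fail_idx = -1 then
    (true, "CRC fail path not observed in this log (non-blocking).")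
  else
    let handoff_after_crc_fail :=
      (PySem.List.slice lines (some (crc_fail_idx + 1)) none).any
        (fun line => PySem.Str.isIn "BL_EVT:HANDOFF_APP" line)
    if handoff_after_crc_fail then
      (false, "CRC fail observed but app handoff occurred afterward in same trace.")
    else
      (true, "CRC fail path observed without app handoff.")

-- ===== PORT B =====
def pvAltGo : List String → Bool → Bool × String
  | [], crc_seen =>
    if crc_seen then (true, "CRC fail path observed without app handoff.")
    else (true, "CRC fail path not observed in this log (non-blocking).")
  | line :: rest, crc_seen =>
    if crc_seen && PySem.Str.isIn "BL_EVT:HANDOFF_APP" line then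
      (false, "CRC fail observed but app handoff occurred afterward in same trace.")
    else
      pvAltGo rest (crc_seen || PySem.Str.isIn "BL_EVT:APP_CRC_FAIL" line)

def check_crc_fail_safety_alt (lines : List String) : Bool × String :=
  pvAltGo lines false

-- ===== PRECONDITION & SPEC =====
def Spec_check_crc_fail_safety (lines : List String) (out : Bool × String) : Prop := out = check_crc_fail_safety_alt lines
instance (lines : List String) (out : Bool × String) : Decidable (Spec_check_crc_fail_safety lines out) := by unfold Spec_check_crc_fail_safety; infer_instance

-- ===== CLAIM (what is proved, stated in full; the proofs are below) =====
def Claim_equal_check_crc_fail_safety : Prop := ∀ (lines : List String), Dom_check_crc_fail_safety lines → Spec_check_crc_fail_safety lines (check_crc_fail_safety lines)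

-- ===== LEMMAS AND PROOFS =====

-- pvAltGo with crc_seen already true just scans for a handoff line.
theorem pvAltGo_true (lines : List String) :
    pvAltGo lines true =
      if lines.any (fun line => PySem.Str.isIn "BL_EVT:HANDOFF_APP" line) then
        (false, "CRC fail observed but app handoff occurred afterward in same trace.")
      else (true, "CRC fail path observed without app handoff.") := by
  induction lines with
  | nil => simp [pvAltGo]
  | cons l rest ih =>
    simp only [pvAltGo, Bool.true_and, Bool.true_or, List.any_cons]
    by_cases h : PySem.Str.isIn "BL_EVT:HANDOFF_APP" l = true
    · rw [if_pos h, if_pos (by rw [h, Bool.true_or])]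
    · rw [if_neg h, ih]
      simp only [Bool.not_eq_true] at h
      simp only [h, Bool.false_or]

-- the index search either fails or returns at least the start index
theorem pvNextCrcIdx_cases (lines : List String) (i : Int) :
    pvNextCrcIdx lines i = -1 ∨ i ≤ pvNextCrcIdx lines i := by
  induction lines generalizing i with
  | nil => exact Or.inl rfl
  | cons l rest ih =>
    simp only [pvNextCrcIdx]
    cases h : PySem.Str.isIn "BL_EVT:APP_CRC_FAIL" l
    case true => simp only [if_true]; omega
    case false =>
      simp only [Bool.false_eq_true, if_false]
      rcases ih (i + 1) with h' | h'
      · exact Or.inl h'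
      · exact Or.inr (by omega)

-- shift lemma for the accumulator index
theorem pvNextCrcIdx_shift (lines : List String) (i : Int) :
    pvNextCrcIdx lines i =
      if pvNextCrcIdx lines 0 = -1 then -1 else pvNextCrcIdx lines 0 + i := by
  induction lines generalizing i with
  | nil => simp [pvNextCrcIdx]
  | cons l rest ih =>
    simp only [pvNextCrcIdx]
    cases h : PySem.Str.isIn "BL_EVT:APP_CRC_FAIL" l
    case true => simp only [if_true]; norm_num
    case false =>
      simp only [Bool.false_eq_true, if_false]
      norm_num
      rw [ih (i + 1), ih 1]
      rcases pvNextCrcIdx_cases rest 0 with h0 | h0 <;> split_ifs <;> omega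

theorem check_eq_alt (lines : List String) :
    check_crc_fail_safety lines = pvAltGo lines false := by
  induction lines with
  | nil => simp [check_crc_fail_safety, pvNextCrcIdx, pvAltGo]
  | cons l rest ih =>
    by_cases h : PySem.Str.isIn "BL_EVT:APP_CRC_FAIL" l
    · -- first CRC-fail line is the head: A scans the tail for handoff, B switches to crc_seen = true
      simp only [check_crc_fail_safety, pvNextCrcIdx, h, if_pos, pvAltGo, Bool.false_and,
        Bool.false_eq_true, if_false, Bool.false_or]
      rw [pvAltGo_true]
      norm_num [PySem.List.slice_from_one]
    · -- head is not a CRC-fail line: both reduce to the tail, with A's indices shifted by one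
      have hA : check_crc_fail_safety (l :: rest) = check_crc_fail_safety rest := by
        simp only [check_crc_fail_safety, pvNextCrcIdx, h, Bool.false_eq_true, if_false,
          zero_add]
        rw [pvNextCrcIdx_shift rest 1]
        by_cases h0 : pvNextCrcIdx rest 0 = -1
        · simp [h0]
        · have hge : 0 ≤ pvNextCrcIdx rest 0 := by
            rcases pvNextCrcIdx_cases rest 0 with h' | h'
            · exact absurd h' h0
            · exact h'
          rw [if_neg h0, if_neg (by omega), if_neg h0]
          have hslice : PySem.List.slice (l :: rest)
              (some (pvNextCrcIdx rest 0 + 1 + 1)) none =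
              PySem.List.slice rest (some (pvNextCrcIdx rest 0 + 1)) none := by
            rw [PySem.List.slice_from _ (by omega), PySem.List.slice_from _ (by omega)]
            have ht : (pvNextCrcIdx rest 0 + 1 + 1).toNat =
                (pvNextCrcIdx rest 0 + 1).toNat + 1 := by omega
            rw [ht, List.drop_succ_cons]
          rw [hslice]
      rw [hA, ih]
      have h' : PySem.Str.isIn "BL_EVT:APP_CRC_FAIL" l = false := by
        simpa using h
      simp only [pvAltGo, Bool.false_and, Bool.false_eq_true, if_false, Bool.false_or, h']

-- ===== VERDICT (by name: the statement is the Claim_ definition above) =====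
theorem check_crc_fail_safety_spec : Claim_equal_check_crc_fail_safety := by
  intro lines _
  unfold Spec_check_crc_fail_safety check_crc_fail_safety_alt
  exact check_eq_alt lines
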